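-- pv_equiv track=rewrite | github.com/fenglinbei/majiang_pygame | AI2.py | read_hands
-- ===== SOURCE A (Python) =====
-- def read_hands(hands: str):
--     hands_dict = {'m': [], 'p': [], 's': [], 'z': []}
--     while len(hands) > 0:
--         m_card = hands.split('m', 1)
--         p_card = hands.split('p', 1)
--         s_card = hands.split('s', 1)
--         z_card = hands.split('z', 1)
--         if not [False for t in ['p', 's', 'z'] if t in m_card[0]] and len(m_card) > 1:
--             for num in m_card[0]:
--                 hands_dict['m'].append(int(num))
--             hands = m_card[1]
--
--         elif not [False for t in ['m', 's', 'z'] if t in p_card[0]] and len(p_card) > 1: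
--             for num in p_card[0]:
--                 hands_dict['p'].append(int(num))
--             hands = p_card[1]
--
--         elif not [False for t in ['m', 'p', 'z'] if t in s_card[0]] and len(s_card) > 1:
--             for num in s_card[0]:
--                 hands_dict['s'].append(int(num))
--             hands = s_card[1]
--
--         elif not [False for t in ['m', 'p', 's'] if t in z_card[0]] and len(z_card) > 1:
--             for num in z_card[0]:
--                 hands_dict['z'].append(int(num))
--             hands = z_card[1]
--     for t in ['m', 'p', 's', 'z']:
--         hands_dict[t].sort()
--     return hands_dict
-- ===== SOURCE B (Python) =====
-- def read_hands(hands: str):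
--     counts = {t: [0] * 10 for t in 'mpsz'}
--     pending = [0] * 10
--     for c in hands:
--         if c in 'mpsz':
--             suit = counts[c]
--             for d in range(10):
--                 suit[d] += pending[d]
--             pending = [0] * 10
--         else:
--             pending[int(c)] += 1
--     return {t: [d for d in range(10) for _ in range(counts[t][d])] for t in 'mpsz'}
-- ===== Notes on version B (the rewrite author's own statement) =====
-- stated objective: alternative
-- what changed: B replaces A's repeated four-way split loop (which re-splits the remaining hand on every suit letter) and the final comparison .sort() per suit by a single left-to-right character scan that maintains a fixed 10-slot count table per suit and rebuilds each suit's list by counting sort, so it never calls .split() or .sort(); A is quadratic in the hand length, B is linear, but a timing run could not measure this because A diverges on malformed timing inputs.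
import Mathlib
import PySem

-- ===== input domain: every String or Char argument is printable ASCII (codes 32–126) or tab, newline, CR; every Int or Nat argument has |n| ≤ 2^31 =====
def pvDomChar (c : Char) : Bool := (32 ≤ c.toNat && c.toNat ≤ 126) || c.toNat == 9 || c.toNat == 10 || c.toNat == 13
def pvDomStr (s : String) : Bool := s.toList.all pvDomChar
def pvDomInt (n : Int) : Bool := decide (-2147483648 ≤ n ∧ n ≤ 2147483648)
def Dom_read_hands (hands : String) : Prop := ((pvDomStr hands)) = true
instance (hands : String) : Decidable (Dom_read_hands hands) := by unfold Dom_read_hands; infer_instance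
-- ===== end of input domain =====

-- B replaces A's repeated four-way split loop + per-suit .sort() by one character scan over the
-- hand that maintains 10-slot count tables and rebuilds each suit's list by counting sort.

-- ===== PORT A =====
-- int(num) for the single-char strings of a prefix, in order (none = ValueError)
def pvParseDigits : List Char → Option (List Int)
  | [] => some []
  | c :: rest =>
    match PySem.Int.ofChars? [c], pvParseDigits rest with
    | some d, some ds => some (d :: ds)
    | _, _ => none

-- A's while loop; fuel bounds the iterations (Python diverges when no branch fires — then the
-- fuel runs out on an unchanged `hands` and the loop answers none, an input outside Pre_).
def pvLoopA : Nat → List Char → List Int → List Int → List Int → List Int →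
    Option (List Int × List Int × List Int × List Int)
  | 0, hands, m, p, s, z => if hands.length > 0 then none else some (m, p, s, z)
  | fuel + 1, hands, m, p, s, z =>
    if hands.length > 0 then
      let m_card := PySem.Chars.splitOnMax hands ['m'] 1
      let p_card := PySem.Chars.splitOnMax hands ['p'] 1
      let s_card := PySem.Chars.splitOnMax hands ['s'] 1
      let z_card := PySem.Chars.splitOnMax hands ['z'] 1
      if (!(PySem.Chars.isIn ['p'] (m_card.headD []) || PySem.Chars.isIn ['s'] (m_card.headD []) ||
            PySem.Chars.isIn ['z'] (m_card.headD []))) && decide (m_card.length > 1) then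
        match pvParseDigits (m_card.headD []) with
        | none => none
        | some ds => pvLoopA fuel (m_card.getD 1 []) (m ++ ds) p s z
      else if (!(PySem.Chars.isIn ['m'] (p_card.headD []) || PySem.Chars.isIn ['s'] (p_card.headD []) ||
            PySem.Chars.isIn ['z'] (p_card.headD []))) && decide (p_card.length > 1) then
        match pvParseDigits (p_card.headD []) with
        | none => none
        | some ds => pvLoopA fuel (p_card.getD 1 []) m (p ++ ds) s z
      else if (!(PySem.Chars.isIn ['m'] (s_card.headD []) || PySem.Chars.isIn ['p'] (s_card.headD []) ||
            PySem.Chars.isIn ['z'] (s_card.headD []))) && decide (s_card.length > 1) then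
        match pvParseDigits (s_card.headD []) with
        | none => none
        | some ds => pvLoopA fuel (s_card.getD 1 []) m p (s ++ ds) z
      else if (!(PySem.Chars.isIn ['m'] (z_card.headD []) || PySem.Chars.isIn ['p'] (z_card.headD []) ||
            PySem.Chars.isIn ['s'] (z_card.headD []))) && decide (z_card.length > 1) then
        match pvParseDigits (z_card.headD []) with
        | none => none
        | some ds => pvLoopA fuel (z_card.getD 1 []) m p s (z ++ ds)
      else pvLoopA fuel hands m p s z
    else some (m, p, s, z)

def read_hands (hands : String) : List (String × List Int) :=
  match pvLoopA (hands.toList.length + 1) hands.toList [] [] [] [] with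
  | none => []
  | some (m, p, s, z) =>
    [("m", PySem.List.sorted m (fun x => x) false), ("p", PySem.List.sorted p (fun x => x) false),
     ("s", PySem.List.sorted s (fun x => x) false), ("z", PySem.List.sorted z (fun x => x) false)]

-- ===== PORT B =====
-- for d in range(10): suit[d] += pending[d]
def pvMergeB (suit pend : List Int) : List Int :=
  (List.range 10).foldl (fun acc d => acc.set d (acc.getD d 0 + pend.getD d 0)) suit

-- one iteration of B's for-loop over the characters (none = ValueError/IndexError of A's int/index)
def pvStepB (st : Option (List Int × List Int × List Int × List Int × List Int)) (c : Char) :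
    Option (List Int × List Int × List Int × List Int × List Int) :=
  match st with
  | none => none
  | some (cm, cp, cs, cz, pend) =>
    if c = 'm' then some (pvMergeB cm pend, cp, cs, cz, List.replicate 10 0)
    else if c = 'p' then some (cm, pvMergeB cp pend, cs, cz, List.replicate 10 0)
    else if c = 's' then some (cm, cp, pvMergeB cs pend, cz, List.replicate 10 0)
    else if c = 'z' then some (cm, cp, cs, pvMergeB cz pend, List.replicate 10 0)
    else
      match PySem.Int.ofChars? [c] with
      | none => none
      | some d =>
        if 0 ≤ d ∧ d < 10 then some (cm, cp, cs, cz, pend.set d.toNat (pend.getD d.toNat 0 + 1))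
        else none

-- [d for d in range(10) for _ in range(counts[d])]
def pvRebuildB (counts : List Int) : List Int :=
  (List.range 10).flatMap (fun d => List.replicate ((counts.getD d 0).toNat) (d : Int))

def read_hands_alt (hands : String) : List (String × List Int) :=
  match hands.toList.foldl pvStepB
      (some (List.replicate 10 0, List.replicate 10 0, List.replicate 10 0, List.replicate 10 0,
             List.replicate 10 0)) with
  | none => []
  | some (cm, cp, cs, cz, _) =>
    [("m", pvRebuildB cm), ("p", pvRebuildB cp), ("s", pvRebuildB cs), ("z", pvRebuildB cz)]

-- ===== PRECONDITION & SPEC =====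
def pvIsSuit (c : Char) : Bool := c == 'm' || c == 'p' || c == 's' || c == 'z'
def pvIsDig (c : Char) : Bool :=
  c == '0' || c == '1' || c == '2' || c == '3' || c == '4' || c == '5' || c == '6' || c == '7' ||
  c == '8' || c == '9'

-- Pre_ excludes exactly the inputs on which A never returns: a character that is neither a digit
-- nor a suit letter m/p/s/z makes A raise ValueError (int of it), and a non-empty hand whose last
-- character is not a suit letter makes A's while loop spin forever on the leftover digits.
def Pre_read_hands (hands : String) : Prop :=
  hands.toList.all (fun c => pvIsDig c || pvIsSuit c) = true ∧
  hands.toList.getLast?.all pvIsSuit = true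
instance (hands : String) : Decidable (Pre_read_hands hands) := by
  unfold Pre_read_hands; infer_instance

def pvWitness_read_hands : String := "123m45p7z"

def Spec_read_hands (hands : String) (out : List (String × List Int)) : Prop := out = read_hands_alt hands
instance (hands : String) (out : List (String × List Int)) : Decidable (Spec_read_hands hands out) := by unfold Spec_read_hands; infer_instance

-- ===== CLAIM (what is proved, stated in full; the proofs are below) =====
def Claim_equal_read_hands : Prop := ∀ (hands : String), Dom_read_hands hands → Pre_read_hands hands → Spec_read_hands hands (read_hands hands)

-- ===== LEMMAS AND PROOFS =====

-- value of a single digit character, as both ports compute it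
def pvVal (c : Char) : Int := (PySem.Int.ofChars? [c]).getD 0

-- digits (as values) assigned to suit letter t by a left-to-right scan with pending buffer
def pvSeg (t : Char) : List Char → List Int → List Int
  | [], _ => []
  | c :: rest, pend =>
    if pvIsSuit c then (if c == t then pend ++ pvSeg t rest [] else pvSeg t rest [])
    else pvSeg t rest (pend ++ [pvVal c])

-- leftover pending digits after the scan
def pvRem : List Char → List Int → List Int
  | [], pend => pend
  | c :: rest, pend => if pvIsSuit c then pvRem rest [] else pvRem rest (pend ++ [pvVal c])

def pvCnt (d : Nat) (V : List Int) : Int := (V.count (d : Int) : Int)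
def pvTbl (V : List Int) : List Int :=
  [pvCnt 0 V, pvCnt 1 V, pvCnt 2 V, pvCnt 3 V, pvCnt 4 V, pvCnt 5 V, pvCnt 6 V, pvCnt 7 V,
   pvCnt 8 V, pvCnt 9 V]

theorem pvDigitFact (c : Char) (h : pvIsDig c = true) :
    PySem.Int.ofChars? [c] = some (pvVal c) ∧ 0 ≤ pvVal c ∧ pvVal c < 10 ∧ pvIsSuit c = false := by
  simp only [pvIsDig, Bool.or_eq_true, beq_iff_eq] at h
  rcases h with ((((((((h|h)|h)|h)|h)|h)|h)|h)|h)|h <;> subst h <;> decide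

theorem pvDigNeSuit (c u : Char) (hc : pvIsDig c = true) (hu : pvIsSuit u = true) : c ≠ u := by
  intro h; subst h
  exact absurd hu (by simp [(pvDigitFact c hc).2.2.2])

theorem goZero (sep : List Char) (fuel : Nat) (cs cur : List Char) (acc : List (List Char)) :
    PySem.Chars.splitOnMax.go sep fuel 0 cs cur acc = ((cur.reverse ++ cs) :: acc).reverse := by
  cases fuel with
  | zero => simp [PySem.Chars.splitOnMax.go]
  | succ f => cases cs with
    | nil => simp [PySem.Chars.splitOnMax.go]
    | cons c r => simp [PySem.Chars.splitOnMax.go]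

theorem goNoSep (l : Char) (cs : List Char) (hn : l ∉ cs) :
    ∀ (fuel : Nat) (m : Nat) (cur : List Char) (acc : List (List Char)), cs.length < fuel →
    PySem.Chars.splitOnMax.go [l] fuel m cs cur acc = ((cur.reverse ++ cs) :: acc).reverse := by
  induction cs with
  | nil =>
    intro fuel m cur acc hf
    cases fuel with
    | zero => omega
    | succ f => simp [PySem.Chars.splitOnMax.go]
  | cons c r ih =>
    intro fuel m cur acc hf
    cases fuel with
    | zero => omega
    | succ f =>
      have hcl : ¬ (l = c) := fun h => hn (by simp [h])
      cases m with
      | zero => simp [PySem.Chars.splitOnMax.go]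
      | succ m' =>
        have : List.isPrefixOf [l] (c :: r) = false := by
          simp [List.isPrefixOf]; intro h; exact absurd h hcl
        simp only [PySem.Chars.splitOnMax.go, this]
        rw [if_neg (by omega)]
        simp only [Bool.false_eq_true, if_false]
        rw [ih (fun h => hn (by simp [h])) f (m'+1) (c :: cur) acc (by simpa using Nat.lt_of_succ_lt_succ hf)]
        simp

theorem goFound (l : Char) (pre : List Char) (hn : l ∉ pre) :
    ∀ (fuel : Nat) (rest cur : List Char) (acc : List (List Char)), pre.length < fuel →
    PySem.Chars.splitOnMax.go [l] fuel 1 (pre ++ l :: rest) cur acc =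
      acc.reverse ++ [cur.reverse ++ pre, rest] := by
  induction pre with
  | nil =>
    intro fuel rest cur acc hf
    cases fuel with
    | zero => omega
    | succ f =>
      have hpf : List.isPrefixOf [l] (l :: rest) = true := by simp [List.isPrefixOf]
      simp only [List.nil_append, PySem.Chars.splitOnMax.go, hpf]
      rw [if_neg (by omega)]
      simp only [if_true]
      rw [goZero]
      simp
  | cons c pre' ih =>
    intro fuel rest cur acc hf
    cases fuel with
    | zero => omega
    | succ f =>
      have hcl : ¬ (l = c) := fun h => hn (by simp [h])
      have hpf : List.isPrefixOf [l] (c :: (pre' ++ l :: rest)) = false := by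
        simp [List.isPrefixOf]; intro h; exact absurd h hcl
      simp only [List.cons_append, PySem.Chars.splitOnMax.go, hpf]
      rw [if_neg (by omega)]
      simp only [Bool.false_eq_true, if_false]
      rw [ih (fun h => hn (by simp [h])) f rest (c :: cur) acc (by simpa using Nat.lt_of_succ_lt_succ hf)]
      simp

theorem splitNo (l : Char) (cs : List Char) (hn : l ∉ cs) :
    PySem.Chars.splitOnMax cs [l] 1 = [cs] := by
  unfold PySem.Chars.splitOnMax
  rw [if_neg (by omega)]
  rw [goNoSep l cs hn (cs.length + 1) _ [] [] (by omega)]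
  simp

theorem splitYes (l : Char) (pre rest : List Char) (hn : l ∉ pre) :
    PySem.Chars.splitOnMax (pre ++ l :: rest) [l] 1 = [pre, rest] := by
  unfold PySem.Chars.splitOnMax
  rw [if_neg (by omega)]
  simp only [show (Int.toNat 1) = 1 from rfl]
  rw [goFound l pre hn _ rest [] [] (by simp)]
  simp

theorem pvIsInSingleton (x : Char) (h : List Char) :
    PySem.Chars.isIn [x] h = true ↔ x ∈ h := by
  rw [PySem.Chars.isIn_iff_infix]
  constructor
  · rintro ⟨s, t, rfl⟩; simp
  · intro hm
    obtain ⟨a, b, rfl⟩ := List.append_of_mem hm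
    exact ⟨a, b, by simp⟩

theorem pvFirstSplit (x : Char) (cs : List Char) (h : x ∈ cs) :
    ∃ a b, cs = a ++ x :: b ∧ x ∉ a := by
  induction cs with
  | nil => simp at h
  | cons c r ih =>
    by_cases hc : x = c
    · exact ⟨[], r, by simp [hc]⟩
    · obtain ⟨a, b, rfl, hna⟩ := ih (by rcases List.mem_cons.1 h with h|h; exact absurd h hc; exact h)
      exact ⟨c :: a, b, by simp, by simp [hna, hc]⟩

theorem pvDecomp (cs : List Char) (hne : cs ≠ [])
    (hv : ∀ c ∈ cs, pvIsDig c = true ∨ pvIsSuit c = true)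
    (hl : cs.getLast?.all pvIsSuit = true) :
    ∃ pre l rest, cs = pre ++ l :: rest ∧ (∀ c ∈ pre, pvIsDig c = true) ∧ pvIsSuit l = true := by
  induction cs with
  | nil => exact absurd rfl hne
  | cons c r ih =>
    by_cases hs : pvIsSuit c = true
    · exact ⟨[], c, r, by simp, by simp, hs⟩
    · have hd : pvIsDig c = true := by rcases hv c (by simp) with h|h; exact h; exact absurd h hs
      have hr : r ≠ [] := by
        rintro rfl
        simp [List.getLast?] at hl
        exact hs hl
      obtain ⟨pre, l, rest, hrw, hpre, hls⟩ :=
        ih hr (fun c' h' => hv c' (by simp [h'])) (by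
          cases r with
          | nil => exact absurd rfl hr
          | cons b rb => rwa [List.getLast?_cons_cons] at hl)
      refine ⟨c :: pre, l, rest, by simp [hrw], ?_, hls⟩
      intro c' h'
      rcases List.mem_cons.1 h' with h'|h'
      · subst h'; exact hd
      · exact hpre c' h'

theorem pvCondFalse (t l : Char) (pre rest : List Char)
    (hts : pvIsSuit t = true) (hne : t ≠ l)
    (hpre : ∀ c ∈ pre, pvIsDig c = true) :
    (PySem.Chars.splitOnMax (pre ++ l :: rest) [t] 1).length ≤ 1 ∨
      l ∈ (PySem.Chars.splitOnMax (pre ++ l :: rest) [t] 1).headD [] := by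
  by_cases hmem : t ∈ pre ++ l :: rest
  · right
    have htr : t ∈ rest := by
      rcases List.mem_append.1 hmem with h | h
      · exact absurd rfl (pvDigNeSuit t t (hpre t h) hts)
      · rcases List.mem_cons.1 h with h | h
        · exact absurd h hne
        · exact h
    obtain ⟨a, b, hab, hna⟩ := pvFirstSplit t rest htr
    have hrw : pre ++ l :: rest = (pre ++ l :: a) ++ t :: b := by simp [hab]
    have hnt : t ∉ pre ++ l :: a := by
      intro h
      rcases List.mem_append.1 h with h | h
      · exact absurd rfl (pvDigNeSuit t t (hpre t h) hts)
      · rcases List.mem_cons.1 h with h | h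
        · exact absurd h hne
        · exact hna h
    rw [hrw, splitYes t _ b hnt]
    simp
  · left
    rw [splitNo t _ hmem]
    simp

theorem pvParse (pre : List Char) (hpre : ∀ c ∈ pre, pvIsDig c = true) :
    pvParseDigits pre = some (pre.map pvVal) := by
  induction pre with
  | nil => simp [pvParseDigits]
  | cons c r ih =>
    simp only [pvParseDigits, (pvDigitFact c (hpre c (by simp))).1,
      ih (fun c' h' => hpre c' (by simp [h']))]
    simp

theorem pvSegWalk (t l : Char) (pre rest : List Char) (pend : List Int)
    (hpre : ∀ c ∈ pre, pvIsDig c = true) (hls : pvIsSuit l = true) :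
    pvSeg t (pre ++ l :: rest) pend =
      (if l == t then pend ++ pre.map pvVal else []) ++ pvSeg t rest [] := by
  induction pre generalizing pend with
  | nil =>
    simp only [List.nil_append, pvSeg, hls, if_true]
    by_cases h : l == t <;> simp [h]
  | cons c pre' ih =>
    have hd := pvDigitFact c (hpre c (by simp))
    simp only [List.cons_append, pvSeg, hd.2.2.2, Bool.false_eq_true, if_false]
    rw [ih _ (fun c' h' => hpre c' (by simp [h']))]
    by_cases h : l == t <;> simp [h]

theorem pvBranchFalse (t l x1 x2 x3 : Char) (pre rest : List Char)
    (hts : pvIsSuit t = true) (hne : t ≠ l)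
    (hx : l = x1 ∨ l = x2 ∨ l = x3)
    (hpre : ∀ c ∈ pre, pvIsDig c = true) :
    ((!(PySem.Chars.isIn [x1] ((PySem.Chars.splitOnMax (pre ++ l :: rest) [t] 1).headD []) ||
        PySem.Chars.isIn [x2] ((PySem.Chars.splitOnMax (pre ++ l :: rest) [t] 1).headD []) ||
        PySem.Chars.isIn [x3] ((PySem.Chars.splitOnMax (pre ++ l :: rest) [t] 1).headD []))) &&
      decide ((PySem.Chars.splitOnMax (pre ++ l :: rest) [t] 1).length > 1)) = false := by
  rcases pvCondFalse t l pre rest hts hne hpre with h | h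
  · have : ¬ ((PySem.Chars.splitOnMax (pre ++ l :: rest) [t] 1).length > 1) := by omega
    simp [this]
  · have hin : PySem.Chars.isIn [l] ((PySem.Chars.splitOnMax (pre ++ l :: rest) [t] 1).headD []) = true :=
      (pvIsInSingleton _ _).2 h
    rcases hx with rfl | rfl | rfl <;> simp_all

theorem pvRestLast (pre : List Char) (l : Char) (rest : List Char)
    (hl : (pre ++ l :: rest).getLast?.all pvIsSuit = true) :
    rest.getLast?.all pvIsSuit = true := by
  cases h : rest with
  | nil => simp
  | cons b rb =>
    subst h
    rwa [show pre ++ l :: b :: rb = (pre ++ [l]) ++ (b :: rb) by simp,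
      List.getLast?_append_of_ne_nil (pre ++ [l]) (l₂ := b :: rb) (by simp)] at hl

theorem pvLemmaA (fuel : Nat) : ∀ (cs : List Char) (m p s z : List Int),
    cs.length < fuel →
    (∀ c ∈ cs, pvIsDig c = true ∨ pvIsSuit c = true) →
    cs.getLast?.all pvIsSuit = true →
    pvLoopA fuel cs m p s z =
      some (m ++ pvSeg 'm' cs [], p ++ pvSeg 'p' cs [], s ++ pvSeg 's' cs [], z ++ pvSeg 'z' cs []) := by
  induction fuel with
  | zero => intro cs m p s z hf _ _; exact absurd hf (by omega)
  | succ fuel ih =>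
    intro cs m p s z hf hv hl
    by_cases hne : cs = []
    · subst hne; simp [pvLoopA, pvSeg]
    · obtain ⟨pre, l, rest, rfl, hpre, hls⟩ := pvDecomp cs hne hv hl
      have hrv : ∀ c ∈ rest, pvIsDig c = true ∨ pvIsSuit c = true := fun c h => hv c (by simp [h])
      have hrl : rest.getLast?.all pvIsSuit = true := pvRestLast pre l rest hl
      have hfr : rest.length < fuel := by simp at hf; omega
      have hnp : ∀ u, pvIsSuit u = true → u ∉ pre := fun u hu h => pvDigNeSuit u u (hpre u h) hu rfl
      have hnotin : ∀ u, pvIsSuit u = true → PySem.Chars.isIn [u] pre = false := by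
        intro u hu
        rw [Bool.eq_false_iff]
        intro hc
        exact pvDigNeSuit u u (hpre u ((pvIsInSingleton u pre).1 hc)) hu rfl
      have hl4 : l = 'm' ∨ l = 'p' ∨ l = 's' ∨ l = 'z' := by
        simpa [pvIsSuit, or_assoc] using hls
      have hseg : ∀ t : Char, pvSeg t (pre ++ l :: rest) [] =
          (if l == t then pre.map pvVal else []) ++ pvSeg t rest [] := by
        intro t
        rw [pvSegWalk t l pre rest [] hpre hls]
        by_cases h : l == t <;> simp [h]
      rcases hl4 with rfl | rfl | rfl | rfl
      · -- l = 'm'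
        simp only [pvLoopA, List.length_append, List.length_cons, gt_iff_lt, if_pos (by omega : (0:Nat) < pre.length + (rest.length + 1)),
          splitYes 'm' pre rest (hnp 'm' (by decide))]
        simp only [List.headD, pvParse pre hpre]
        rw [if_pos (by simp [hnotin 'p' (by decide), hnotin 's' (by decide), hnotin 'z' (by decide)])]
        simp only [show (([pre, rest] : List (List Char)).getD 1 []) = rest from rfl]
        rw [ih rest (m ++ pre.map pvVal) p s z hfr hrv hrl]
        simp [hseg]
      · -- l = 'p'
        simp only [pvLoopA, List.length_append, List.length_cons, gt_iff_lt, if_pos (by omega : (0:Nat) < pre.length + (rest.length + 1)),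
          pvBranchFalse 'm' 'p' 'p' 's' 'z' pre rest (by decide) (by decide) (by simp) hpre,
          splitYes 'p' pre rest (hnp 'p' (by decide))]
        simp only [Bool.false_eq_true, if_false, List.headD, pvParse pre hpre]
        rw [if_pos (by simp [hnotin 'm' (by decide), hnotin 's' (by decide), hnotin 'z' (by decide)])]
        simp only [show (([pre, rest] : List (List Char)).getD 1 []) = rest from rfl]
        rw [ih rest m (p ++ pre.map pvVal) s z hfr hrv hrl]
        simp [hseg]
      · -- l = 's'
        simp only [pvLoopA, List.length_append, List.length_cons, gt_iff_lt, if_pos (by omega : (0:Nat) < pre.length + (rest.length + 1)),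
          pvBranchFalse 'm' 's' 'p' 's' 'z' pre rest (by decide) (by decide) (by simp) hpre,
          pvBranchFalse 'p' 's' 'm' 's' 'z' pre rest (by decide) (by decide) (by simp) hpre,
          splitYes 's' pre rest (hnp 's' (by decide))]
        simp only [Bool.false_eq_true, if_false, List.headD, pvParse pre hpre]
        rw [if_pos (by simp [hnotin 'm' (by decide), hnotin 'p' (by decide), hnotin 'z' (by decide)])]
        simp only [show (([pre, rest] : List (List Char)).getD 1 []) = rest from rfl]
        rw [ih rest m p (s ++ pre.map pvVal) z hfr hrv hrl]
        simp [hseg]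
      · -- l = 'z'
        simp only [pvLoopA, List.length_append, List.length_cons, gt_iff_lt, if_pos (by omega : (0:Nat) < pre.length + (rest.length + 1)),
          pvBranchFalse 'm' 'z' 'p' 's' 'z' pre rest (by decide) (by decide) (by simp) hpre,
          pvBranchFalse 'p' 'z' 'm' 's' 'z' pre rest (by decide) (by decide) (by simp) hpre,
          pvBranchFalse 's' 'z' 'm' 'p' 'z' pre rest (by decide) (by decide) (by simp) hpre,
          splitYes 'z' pre rest (hnp 'z' (by decide))]
        simp only [Bool.false_eq_true, if_false, List.headD, pvParse pre hpre]
        rw [if_pos (by simp [hnotin 'm' (by decide), hnotin 'p' (by decide), hnotin 's' (by decide)])]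
        simp only [show (([pre, rest] : List (List Char)).getD 1 []) = rest from rfl]
        rw [ih rest m p s (z ++ pre.map pvVal) hfr hrv hrl]
        simp [hseg]

theorem pvSegBounds (t : Char) (cs : List Char) (pend : List Int)
    (hv : ∀ c ∈ cs, pvIsDig c = true ∨ pvIsSuit c = true)
    (hp : ∀ x ∈ pend, 0 ≤ x ∧ x < 10) :
    ∀ x ∈ pvSeg t cs pend, 0 ≤ x ∧ x < 10 := by
  induction cs generalizing pend with
  | nil => simp [pvSeg]
  | cons c rest ih =>
    have hc := hv c (by simp)
    have hrest : ∀ c' ∈ rest, pvIsDig c' = true ∨ pvIsSuit c' = true := fun c' h' => hv c' (by simp [h'])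
    simp only [pvSeg]
    split
    · split
      · intro x hx
        rcases List.mem_append.1 hx with h | h
        · exact hp x h
        · exact ih [] hrest (by simp) x h
      · exact ih [] hrest (by simp)
    · rename_i hns
      refine ih (pend ++ [pvVal c]) hrest ?_ 
      intro x hx
      rcases List.mem_append.1 hx with h | h
      · exact hp x h
      · rcases hc with hd | hsu
        · simp at h; subst h
          exact ⟨(pvDigitFact c hd).2.1, (pvDigitFact c hd).2.2.1⟩
        · simp [hsu] at hns

theorem pvTblNilRepl : List.replicate 10 (0 : Int) = pvTbl [] := by decide

theorem pvMergeTbl (V P : List Int) : pvMergeB (pvTbl V) (pvTbl P) = pvTbl (V ++ P) := by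
  simp [pvMergeB, pvTbl, pvCnt, show List.range 10 = [0,1,2,3,4,5,6,7,8,9] from rfl,
    List.count_append]

theorem pvPendSet (P : List Int) (d : Int) (h0 : 0 ≤ d) (h1 : d < 10) :
    (pvTbl P).set d.toNat ((pvTbl P).getD d.toNat 0 + 1) = pvTbl (P ++ [d]) := by
  interval_cases d <;> simp [pvTbl, pvCnt, List.count_append]

theorem pvLemmaB (cs : List Char)
    (hv : ∀ c ∈ cs, pvIsDig c = true ∨ pvIsSuit c = true) :
    ∀ (P Vm Vp Vs Vz : List Int),
      cs.foldl pvStepB (some (pvTbl Vm, pvTbl Vp, pvTbl Vs, pvTbl Vz, pvTbl P)) =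
      some (pvTbl (Vm ++ pvSeg 'm' cs P), pvTbl (Vp ++ pvSeg 'p' cs P),
            pvTbl (Vs ++ pvSeg 's' cs P), pvTbl (Vz ++ pvSeg 'z' cs P), pvTbl (pvRem cs P)) := by
  induction cs with
  | nil => intro P Vm Vp Vs Vz; simp [pvSeg, pvRem]
  | cons c rest ih =>
    intro P Vm Vp Vs Vz
    have hrv : ∀ c' ∈ rest, pvIsDig c' = true ∨ pvIsSuit c' = true := fun c' h' => hv c' (by simp [h'])
    rcases hv c (by simp) with hd | hs
    · have hfact := pvDigitFact c hd
      have hns : pvIsSuit c = false := hfact.2.2.2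
      have hne : ¬(c = 'm') ∧ ¬(c = 'p') ∧ ¬(c = 's') ∧ ¬(c = 'z') := by
        simpa [pvIsSuit, not_or, and_assoc] using hns
      simp only [List.foldl_cons, pvStepB, if_neg hne.1, if_neg hne.2.1, if_neg hne.2.2.1,
        if_neg hne.2.2.2, hfact.1]
      rw [if_pos ⟨hfact.2.1, hfact.2.2.1⟩, pvPendSet P (pvVal c) hfact.2.1 hfact.2.2.1,
        ih hrv (P ++ [pvVal c]) Vm Vp Vs Vz]
      simp [pvSeg, pvRem, hns]
    · have hc4 : c = 'm' ∨ c = 'p' ∨ c = 's' ∨ c = 'z' := by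
        simpa [pvIsSuit, or_assoc] using hs
      rcases hc4 with rfl | rfl | rfl | rfl
      · simp only [List.foldl_cons, pvStepB]
        rw [if_pos trivial, pvMergeTbl Vm P, pvTblNilRepl, ih hrv [] (Vm ++ P) Vp Vs Vz]
        simp [pvSeg, pvRem, pvIsSuit]
      · simp only [List.foldl_cons, pvStepB]
        rw [if_neg (by decide : ¬('p' = 'm')), if_pos trivial, pvMergeTbl Vp P, pvTblNilRepl,
          ih hrv [] Vm (Vp ++ P) Vs Vz]
        simp [pvSeg, pvRem, pvIsSuit]
      · simp only [List.foldl_cons, pvStepB]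
        rw [if_neg (by decide : ¬('s' = 'm')), if_neg (by decide : ¬('s' = 'p')), if_pos trivial,
          pvMergeTbl Vs P, pvTblNilRepl, ih hrv [] Vm Vp (Vs ++ P) Vz]
        simp [pvSeg, pvRem, pvIsSuit]
      · simp only [List.foldl_cons, pvStepB]
        rw [if_neg (by decide : ¬('z' = 'm')), if_neg (by decide : ¬('z' = 'p')),
          if_neg (by decide : ¬('z' = 's')), if_pos trivial, pvMergeTbl Vz P, pvTblNilRepl,
          ih hrv [] Vm Vp Vs (Vz ++ P)]
        simp [pvSeg, pvRem, pvIsSuit]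

theorem pvGenPairwise (n : Nat) (cnt : Nat → Nat) :
    ((List.range n).flatMap (fun d => List.replicate (cnt d) (d : Int))).Pairwise (· ≤ ·) := by
  induction n with
  | zero => simp
  | succ n ih =>
    rw [List.range_succ, List.flatMap_append]
    rw [List.pairwise_append]
    refine ⟨ih, by simp [List.pairwise_replicate], ?_⟩
    intro x hx y hy
    obtain ⟨d, hd, hxd⟩ := List.mem_flatMap.1 hx
    have hdn : d < n := List.mem_range.1 hd
    have hxv : x = (d : Int) := (List.eq_of_mem_replicate hxd)
    have hyv : y = (n : Int) := by
      simp at hy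
      exact hy.2
    subst hxv; subst hyv
    exact_mod_cast Nat.le_of_lt hdn

theorem pvRebuildExplicit (V : List Int) :
    pvRebuildB (pvTbl V) = List.replicate (pvCnt 0 V).toNat (0 : Int) ++ (List.replicate (pvCnt 1 V).toNat (1 : Int) ++ (List.replicate (pvCnt 2 V).toNat (2 : Int) ++ (List.replicate (pvCnt 3 V).toNat (3 : Int) ++ (List.replicate (pvCnt 4 V).toNat (4 : Int) ++ (List.replicate (pvCnt 5 V).toNat (5 : Int) ++ (List.replicate (pvCnt 6 V).toNat (6 : Int) ++ (List.replicate (pvCnt 7 V).toNat (7 : Int) ++ (List.replicate (pvCnt 8 V).toNat (8 : Int) ++ (List.replicate (pvCnt 9 V).toNat (9 : Int) ++ []))))))))) := rfl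

set_option maxHeartbeats 1000000 in
theorem pvRebuildPerm (V : List Int) (hb : ∀ x ∈ V, 0 ≤ x ∧ x < 10) :
    (pvRebuildB (pvTbl V)).Perm V := by
  rw [List.perm_iff_count]
  intro a
  rw [pvRebuildExplicit]
  by_cases ha : 0 ≤ a ∧ a < 10
  · obtain ⟨h0, h1⟩ := ha
    interval_cases a <;>
      simp [List.count_append, List.count_replicate, pvCnt]
  · have hnm : a ∉ V := fun h => ha (hb a h)
    rw [List.count_eq_zero_of_not_mem hnm, List.count_eq_zero]
    intro hmem
    simp only [List.mem_append, List.mem_replicate, List.not_mem_nil, or_false] at hmem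
    rcases hmem with ⟨-, rfl⟩|⟨-, rfl⟩|⟨-, rfl⟩|⟨-, rfl⟩|⟨-, rfl⟩|⟨-, rfl⟩|⟨-, rfl⟩|⟨-, rfl⟩|⟨-, rfl⟩|⟨-, rfl⟩ <;> omega

theorem pvCountSort (V : List Int) (hb : ∀ x ∈ V, 0 ≤ x ∧ x < 10) :
    pvRebuildB (pvTbl V) = PySem.List.sorted V (fun x => x) false := by
  refine PySem.List.eq_of_perm_of_pairwise_le_of_injective (fun x => x) (fun a b h => h)
    ((pvRebuildPerm V hb).trans (PySem.List.sorted_perm V (fun x => x) false).symm) ?_ ?_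
  · exact pvGenPairwise 10 _
  · exact PySem.List.sorted_pairwise V (fun x => x)

-- ===== VERDICT (by name: the statement is the Claim_ definition above) =====
theorem read_hands_spec : Claim_equal_read_hands := by
  intro hands _hdom hpre
  obtain ⟨hvb, hl⟩ := hpre
  have hv : ∀ c ∈ hands.toList, pvIsDig c = true ∨ pvIsSuit c = true := by
    intro c hc
    simpa using List.all_eq_true.1 hvb c hc
  unfold Spec_read_hands read_hands read_hands_alt
  rw [pvLemmaA (hands.toList.length + 1) hands.toList [] [] [] [] (by omega) hv hl]
  have hinit : (List.replicate 10 (0 : Int)) = pvTbl [] := by decide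
  rw [hinit, pvLemmaB hands.toList hv [] [] [] [] []]
  simp only [List.nil_append]
  rw [pvCountSort _ (pvSegBounds _ _ _ hv (by simp)),
    pvCountSort _ (pvSegBounds _ _ _ hv (by simp)),
    pvCountSort _ (pvSegBounds _ _ _ hv (by simp)),
    pvCountSort _ (pvSegBounds _ _ _ hv (by simp))]
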